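-- pv_equiv track=rewrite | github.com/sixtexteditors/xer-to-smartsheet | backend/xer_parser.py | _build_wbs_ancestors
-- ===== SOURCE A (Python) =====
-- def _build_wbs_ancestors(wbs_node_map: dict) -> dict:
--     """
--     Build a mapping of wbs_id -> list of ancestor nodes (root-to-node inclusive).
--     Each entry includes the node itself at the end of the list.
--     """
--     cache = {}
--
--     def get_ancestors(wbs_id):
--         if wbs_id in cache:
--             return cache[wbs_id]
--         node = wbs_node_map.get(wbs_id)
--         if not node:
--             cache[wbs_id] = []
--             return []
--         parent_id = node.get("parent_wbs_id", "")
--         if parent_id and parent_id in wbs_node_map: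
--             ancestors = get_ancestors(parent_id) + [node]
--         else:
--             ancestors = [node]
--         cache[wbs_id] = ancestors
--         return ancestors
--
--     return {wbs_id: get_ancestors(wbs_id) for wbs_id in wbs_node_map}
-- ===== SOURCE B (Python) =====
-- def _build_wbs_ancestors(wbs_node_map: dict) -> dict:
--     """Iterative version: for each id, walk parent links upward collecting
--     nodes, then reverse to get root-to-node order (no recursion, no cache)."""
--     result = {}
--     for wbs_id in wbs_node_map:
--         node = wbs_node_map.get(wbs_id)
--         if not node:
--             result[wbs_id] = []
--             continue
--         chain = [node]
--         while True:
--             parent_id = node.get("parent_wbs_id", "")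
--             if parent_id and parent_id in wbs_node_map and wbs_node_map[parent_id]:
--                 node = wbs_node_map[parent_id]
--                 chain.append(node)
--             else:
--                 break
--         chain.reverse()
--         result[wbs_id] = chain
--     return result
-- ===== Notes on version B (the rewrite author's own statement) =====
-- stated objective: simpler
-- what changed: Replaces the memoized recursive helper (closure + cache dict + recursion on parents) with a plain iterative upward walk per key that collects the chain and reverses it.
import Mathlib
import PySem

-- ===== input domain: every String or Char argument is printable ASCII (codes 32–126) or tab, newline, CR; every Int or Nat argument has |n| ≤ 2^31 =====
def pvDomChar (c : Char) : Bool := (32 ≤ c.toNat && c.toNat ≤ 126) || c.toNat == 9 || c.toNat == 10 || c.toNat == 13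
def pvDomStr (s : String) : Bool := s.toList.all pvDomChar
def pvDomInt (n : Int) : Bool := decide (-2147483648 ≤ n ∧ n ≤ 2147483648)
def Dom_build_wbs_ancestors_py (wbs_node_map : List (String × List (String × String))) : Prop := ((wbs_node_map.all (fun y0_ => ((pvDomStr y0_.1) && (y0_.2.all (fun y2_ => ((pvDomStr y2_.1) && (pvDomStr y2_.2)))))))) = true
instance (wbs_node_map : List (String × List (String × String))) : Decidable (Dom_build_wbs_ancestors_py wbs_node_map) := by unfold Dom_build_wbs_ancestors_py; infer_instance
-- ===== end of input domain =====

-- B replaces A's memoized recursive helper by an iterative upward walk per key (simpler decomposition, same values).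

-- dict lookup (first match = Python dict lookup since Pre_ requires unique keys)
def pvDGet? (m : List (String × List (String × String))) (k : String) :
    Option (List (String × String)) :=
  (m.find? (fun kv => kv.1 == k)).map (·.2)

-- node.get(key, dflt) for an inner node dict
def pvSGetD (node : List (String × String)) (key dflt : String) : String :=
  (((node.find? (fun kv => kv.1 == key)).map (·.2))).getD dflt

-- ===== PORT A =====
-- get_ancestors with its cache dict; fuel = number of keys + 1, never exhausted under Pre_
def pvGetAncA (m : List (String × List (String × String))) :
    Nat → PySem.Dict String (List (List (String × String))) → String →
    PySem.Dict String (List (List (String × String))) × List (List (String × String))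
  | 0, cache, _ => (cache, [])
  | Nat.succ fuel, cache, k =>
    match cache.get? k with
    | some v => (cache, v)
    | none =>
      match pvDGet? m k with
      | none => (cache.insert k [], [])
      | some node =>
        if node = [] then (cache.insert k [], [])
        else
          let pid := pvSGetD node "parent_wbs_id" ""
          if pid ≠ "" ∧ (pvDGet? m pid).isSome then
            let r := pvGetAncA m fuel cache pid
            let anc := r.2 ++ [node]
            (r.1.insert k anc, anc)
          else (cache.insert k [node], [node])

def build_wbs_ancestors_py (wbs_node_map : List (String × List (String × String))) :
    List (String × List (List (String × String))) :=
  (wbs_node_map.foldl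
    (fun (st : List (String × List (List (String × String))) ×
               PySem.Dict String (List (List (String × String)))) kv =>
      let r := pvGetAncA wbs_node_map (wbs_node_map.length + 1) st.2 kv.1
      (st.1 ++ [(kv.1, r.2)], r.1))
    ([], PySem.Dict.empty)).1

-- ===== PORT B =====
-- the while-True upward walk: append parents to chain, then reverse
def pvWalkB (m : List (String × List (String × String))) :
    Nat → List (String × String) → List (List (String × String)) → List (List (String × String))
  | 0, _, chain => chain.reverse
  | Nat.succ fuel, node, chain =>
    let pid := pvSGetD node "parent_wbs_id" ""
    if pid ≠ "" then
      match pvDGet? m pid with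
      | some pnode =>
        if pnode = [] then chain.reverse
        else pvWalkB m fuel pnode (chain ++ [pnode])
      | none => chain.reverse
    else chain.reverse

def build_wbs_ancestors_py_alt (wbs_node_map : List (String × List (String × String))) :
    List (String × List (List (String × String))) :=
  wbs_node_map.foldl
    (fun res kv =>
      match pvDGet? wbs_node_map kv.1 with
      | none => res ++ [(kv.1, [])]
      | some node =>
        if node = [] then res ++ [(kv.1, [])]
        else res ++ [(kv.1, pvWalkB wbs_node_map (wbs_node_map.length + 1) node [node])])
    []

-- ===== PRECONDITION & SPEC =====
-- pvTermB m f k: the parent chain starting at key k reaches a stop (missing or empty node,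
-- or an empty/absent parent id) within f steps.  With f = (number of keys) + 1 this says the
-- parent LINKS are acyclic at k — a property of the input graph (it builds no ancestor lists);
-- it is the standard decidable statement of acyclicity for a functional graph.
def pvTermB (m : List (String × List (String × String))) : Nat → String → Bool
  | 0, _ => false
  | Nat.succ fuel, k =>
    match pvDGet? m k with
    | none => true
    | some node =>
      if node = [] then true
      else
        let pid := pvSGetD node "parent_wbs_id" ""
        if pid ≠ "" ∧ (pvDGet? m pid).isSome then pvTermB m fuel pid else true

-- Pre_ excludes (a) assoc lists with duplicate keys (outer or inside a node): a Python dict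
-- argument cannot represent them, so they are representation artefacts of the list encoding;
-- and (b) cyclic parent links, on which A raises RecursionError (and B loops).
def Pre_build_wbs_ancestors_py (wbs_node_map : List (String × List (String × String))) : Prop :=
  (wbs_node_map.map (·.1)).Nodup ∧
  (∀ kv ∈ wbs_node_map, (kv.2.map (·.1)).Nodup) ∧
  (∀ kv ∈ wbs_node_map, pvTermB wbs_node_map (wbs_node_map.length + 1) kv.1 = true)

instance (wbs_node_map : List (String × List (String × String))) :
    Decidable (Pre_build_wbs_ancestors_py wbs_node_map) := by
  unfold Pre_build_wbs_ancestors_py; infer_instance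

def pvWitness_build_wbs_ancestors_py : (List (String × List (String × String))) :=
  [("r", [("name", "root")]),
   ("a", [("parent_wbs_id", "r")]),
   ("b", [("parent_wbs_id", "a"), ("name", "leaf")]),
   ("c", [("parent_wbs_id", "zz")]),
   ("d", [])]

def Spec_build_wbs_ancestors_py (wbs_node_map : List (String × List (String × String))) (out : List (String × List (List (String × String)))) : Prop := out = build_wbs_ancestors_py_alt wbs_node_map
instance (wbs_node_map : List (String × List (String × String))) (out : List (String × List (List (String × String)))) : Decidable (Spec_build_wbs_ancestors_py wbs_node_map out) := by unfold Spec_build_wbs_ancestors_py; infer_instance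

-- ===== CLAIM (what is proved, stated in full; the proofs are below) =====
def Claim_equal_build_wbs_ancestors_py : Prop := ∀ (wbs_node_map : List (String × List (String × String))), Dom_build_wbs_ancestors_py wbs_node_map → Pre_build_wbs_ancestors_py wbs_node_map → Spec_build_wbs_ancestors_py wbs_node_map (build_wbs_ancestors_py wbs_node_map)

-- ===== LEMMAS AND PROOFS =====

-- fuel-free reference chain (root-to-node), used only in the proofs
def pvAnc (m : List (String × List (String × String))) : Nat → String → List (List (String × String))
  | 0, _ => []
  | Nat.succ fuel, k =>
    match pvDGet? m k with
    | none => []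
    | some node =>
      if node = [] then []
      else
        let pid := pvSGetD node "parent_wbs_id" ""
        if pid ≠ "" ∧ (pvDGet? m pid).isSome then pvAnc m fuel pid ++ [node] else [node]

theorem pvAnc_stable (m : List (String × List (String × String))) :
    ∀ f f' k, pvTermB m f k = true → f ≤ f' → pvAnc m f' k = pvAnc m f k := by
  intro f
  induction f with
  | zero => intro f' k h; simp [pvTermB] at h
  | succ n ih =>
    intro f' k h hle
    obtain ⟨f'', rfl⟩ : ∃ f'', f' = f'' + 1 := ⟨f' - 1, by omega⟩
    simp only [pvTermB] at h
    simp only [pvAnc]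
    cases hg : pvDGet? m k with
    | none => rfl
    | some node =>
      simp only [hg] at h ⊢
      split_ifs at h ⊢ with h1 h2 <;> try rfl
      rw [ih f'' _ h (by omega)]

-- A-side: the memoized recursion returns the reference chain and keeps the cache correct
theorem pvGetAncA_spec (m : List (String × List (String × String))) :
    ∀ f, f ≤ m.length + 1 → ∀ cache k, pvTermB m f k = true →
      (∀ x v, cache.get? x = some v → v = pvAnc m (m.length + 1) x) →
      (pvGetAncA m f cache k).2 = pvAnc m (m.length + 1) k ∧
      (∀ x v, (pvGetAncA m f cache k).1.get? x = some v → v = pvAnc m (m.length + 1) x) := by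
  intro f
  induction f with
  | zero => intro _ cache k h; simp [pvTermB] at h
  | succ n ih =>
    intro hf cache k h hinv
    simp only [pvTermB] at h
    simp only [pvGetAncA]
    cases hc : cache.get? k with
    | some v => exact ⟨hinv k v hc, hinv⟩
    | none =>
      have hN : pvAnc m (m.length + 1) k =
          match pvDGet? m k with
          | none => []
          | some node =>
            if node = [] then []
            else
              let pid := pvSGetD node "parent_wbs_id" ""
              if pid ≠ "" ∧ (pvDGet? m pid).isSome then pvAnc m m.length pid ++ [node] else [node] := by
        simp [pvAnc]
      cases hg : pvDGet? m k with
      | none =>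
        dsimp only
        refine ⟨by simp [hN, hg], ?_⟩
        intro x v hx
        replace hx : (cache.insert k []).get? x = some v := hx
        rw [PySem.Dict.get?_insert] at hx
        split_ifs at hx with hxk
        · cases hx; subst hxk; rw [hN, hg]
        · exact hinv x v hx
      | some node =>
        dsimp only
        simp only [hg] at h hN
        by_cases hne : node = []
        · rw [if_pos hne] at hN ⊢
          refine ⟨by simp [hN], ?_⟩
          intro x v hx
          replace hx : (cache.insert k []).get? x = some v := hx
          rw [PySem.Dict.get?_insert] at hx
          split_ifs at hx with hxk
          · cases hx; subst hxk; rw [hN]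
          · exact hinv x v hx
        · rw [if_neg hne] at h hN ⊢
          by_cases hp : pvSGetD node "parent_wbs_id" "" ≠ "" ∧ (pvDGet? m (pvSGetD node "parent_wbs_id" "")).isSome
          · rw [if_pos hp] at h hN ⊢
            obtain ⟨ih2, ihinv⟩ := ih (by omega) cache _ h hinv
            have hstab : pvAnc m m.length (pvSGetD node "parent_wbs_id" "") =
                pvAnc m (m.length + 1) (pvSGetD node "parent_wbs_id" "") := by
              rw [pvAnc_stable m n m.length _ h (by omega),
                  pvAnc_stable m n (m.length + 1) _ h (by omega)]
            refine ⟨?_, ?_⟩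
            · show (pvGetAncA m n cache _).2 ++ [node] = _
              rw [ih2, hN, hstab]
            · intro x v hx
              replace hx : ((pvGetAncA m n cache (pvSGetD node "parent_wbs_id" "")).1.insert k
                  ((pvGetAncA m n cache (pvSGetD node "parent_wbs_id" "")).2 ++ [node])).get? x = some v := hx
              rw [PySem.Dict.get?_insert] at hx
              split_ifs at hx with hxk
              · cases hx; subst hxk; rw [hN, ih2, hstab]
              · exact ihinv x v hx
          · rw [if_neg hp] at hN ⊢
            refine ⟨by simp [hN], ?_⟩
            intro x v hx
            replace hx : (cache.insert k [node]).get? x = some v := hx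
            rw [PySem.Dict.get?_insert] at hx
            split_ifs at hx with hxk
            · cases hx; subst hxk; rw [hN]
            · exact hinv x v hx

-- the reference chain ends with the node itself
theorem pvAnc_head (m : List (String × List (String × String))) (f : Nat) (k : String)
    (node : List (String × String)) (h : pvTermB m f k = true)
    (hg : pvDGet? m k = some node) (hne : node ≠ []) :
    ∃ Y, pvAnc m f k = Y ++ [node] := by
  obtain ⟨f', rfl⟩ : ∃ f', f = f' + 1 := by
    cases f with
    | zero => simp [pvTermB] at h
    | succ n => exact ⟨n, rfl⟩
  simp only [pvAnc, hg, if_neg hne]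
  split_ifs with hp
  · exact ⟨_, rfl⟩
  · exact ⟨[], rfl⟩

-- B-side: the upward walk computes the reference chain (reversed into the accumulator)
theorem pvWalkB_spec (m : List (String × List (String × String))) :
    ∀ f k node chain, pvTermB m f k = true → pvDGet? m k = some node → node ≠ [] →
      pvWalkB m f node chain = (chain ++ (pvAnc m f k).reverse.drop 1).reverse := by
  intro f
  induction f with
  | zero => intro k node chain h _ _; simp [pvTermB] at h
  | succ n ih =>
    intro k node chain h hg hne
    simp only [pvTermB, hg] at h
    rw [if_neg hne] at h
    simp only [pvWalkB, pvAnc, hg]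
    rw [if_neg hne]
    by_cases hp0 : pvSGetD node "parent_wbs_id" "" ≠ ""
    · rw [if_pos hp0]
      cases hgp : pvDGet? m (pvSGetD node "parent_wbs_id" "") with
      | none =>
        dsimp only
        simp
      | some pnode =>
        dsimp only
        rw [hgp] at h
        have hp : (pvSGetD node "parent_wbs_id" "" ≠ "" ∧
            ((some pnode).isSome : Bool) = true) := ⟨hp0, rfl⟩
        rw [if_pos hp] at h ⊢
        by_cases hpe : pnode = []
        · rw [if_pos hpe]
          have hanc : pvAnc m n (pvSGetD node "parent_wbs_id" "") = [] := by
            cases n with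
            | zero => simp [pvTermB] at h
            | succ j => subst hpe; simp [pvAnc, hgp]
          simp [hanc]
        · rw [if_neg hpe]
          rw [ih _ pnode _ h hgp hpe]
          obtain ⟨Y, hY⟩ := pvAnc_head m n _ pnode h hgp hpe
          simp [hY]
    · rw [if_neg hp0]
      have hp : ¬ (pvSGetD node "parent_wbs_id" "" ≠ "" ∧
          ((pvDGet? m (pvSGetD node "parent_wbs_id" "")).isSome : Bool) = true) := fun hc => hp0 hc.1
      rw [if_neg hp]
      simp

-- the per-key value of B equals the reference chain
theorem pvAltVal (m : List (String × List (String × String))) (k : String)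
    (h : pvTermB m (m.length + 1) k = true) :
    (match pvDGet? m k with
     | none => ([] : List (List (String × String)))
     | some node =>
       if node = [] then []
       else pvWalkB m (m.length + 1) node [node]) = pvAnc m (m.length + 1) k := by
  cases hg : pvDGet? m k with
  | none => simp [pvAnc, hg]
  | some node =>
    by_cases hne : node = []
    · subst hne; simp [pvAnc, hg]
    · simp only [if_neg hne]
      rw [pvWalkB_spec m _ k node [node] h hg hne]
      obtain ⟨Y, hY⟩ := pvAnc_head m _ k node h hg hne
      simp [hY]

-- both folds produce the same result list, threading A's cache under its invariant
theorem pvFold_eq (m : List (String × List (String × String))) :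
    ∀ (l : List (String × List (String × String))) res cache,
      (∀ kv ∈ l, pvTermB m (m.length + 1) kv.1 = true) →
      (∀ x v, cache.get? x = some v → v = pvAnc m (m.length + 1) x) →
      (l.foldl
        (fun (st : List (String × List (List (String × String))) ×
                   PySem.Dict String (List (List (String × String)))) kv =>
          let r := pvGetAncA m (m.length + 1) st.2 kv.1
          (st.1 ++ [(kv.1, r.2)], r.1))
        (res, cache)).1 =
      l.foldl
        (fun res kv =>
          match pvDGet? m kv.1 with
          | none => res ++ [(kv.1, [])]
          | some node =>
            if node = [] then res ++ [(kv.1, [])]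
            else res ++ [(kv.1, pvWalkB m (m.length + 1) node [node])])
        res := by
  intro l
  induction l with
  | nil => intro res cache _ _; rfl
  | cons kv rest ih =>
    intro res cache hterm hinv
    have hk := hterm kv (by simp)
    obtain ⟨hval, hinv'⟩ := pvGetAncA_spec m (m.length + 1) (le_refl _) cache kv.1 hk hinv
    simp only [List.foldl_cons]
    rw [ih _ _ (fun x hx => hterm x (by simp [hx])) hinv']
    have hb := pvAltVal m kv.1 hk
    congr 1
    cases hg : pvDGet? m kv.1 with
    | none => simp only [hg] at hb ⊢; rw [hval, ← hb]
    | some node =>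
      simp only [hg] at hb ⊢
      by_cases hne : node = []
      · subst hne; rw [hval, ← hb]; simp
      · simp only [if_neg hne] at hb ⊢; rw [hval, ← hb]

-- ===== VERDICT (by name: the statement is the Claim_ definition above) =====
theorem build_wbs_ancestors_py_spec : Claim_equal_build_wbs_ancestors_py := by
  intro m _ hpre
  unfold Spec_build_wbs_ancestors_py build_wbs_ancestors_py build_wbs_ancestors_py_alt
  exact pvFold_eq m m [] PySem.Dict.empty hpre.2.2 (by intro x v hx; simp [PySem.Dict.empty, PySem.Dict.get?] at hx)
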